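-- pv_equiv track=rewrite | github.com/hanna9221/Codility-exercises | Codility/20190217_Yttrium 2019.py | solution
-- ===== SOURCE A (Python) =====
-- def checkOutside(A):
--     res = 0
--     for i in range(26):
--         if A[i] != 0:
--             res += 1
--     return res
--
-- def solution(S, K):
--     N = len(S)
--     if K==0: return N
--     A = [0]*26
--     for c in S:
--         A[ord(c)-97] += 1
--     if checkOutside(A) < K:
--         return -1
--     elif checkOutside(A)==K:
--         return 0
--
--     res, head, tail = N, -1, 0
--     while head < N:
--         if checkOutside(A)==K:
--             res = min(res, head-tail+1)
--             A[ord(S[tail])-97] += 1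
--             tail += 1
--         else: # checkOutside(A) > K
--             head += 1
--             if head==N: return res
--             A[ord(S[head])-97] -= 1
--     return res
-- ===== SOURCE B (Python) =====
-- def solution(S, K):
--     N = len(S)
--     if K == 0:
--         return N
--     cnt = [0] * 26
--     for c in S:
--         cnt[ord(c) - 97] += 1
--     distinct = 26 - cnt.count(0)
--     if distinct < K:
--         return -1
--     if distinct == K:
--         return 0
--     best = N
--     for t in range(N):
--         A = cnt[:]
--         out = distinct
--         h = t
--         while h < N:
--             i = ord(S[h]) - 97
--             A[i] -= 1
--             if A[i] == 0:
--                 out -= 1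
--             if out == K:
--                 best = min(best, h - t + 1)
--                 break
--             h += 1
--     return best
-- ===== Notes on version B (the rewrite author's own statement) =====
-- stated objective: alternative
-- what changed: A is an amortized sliding-window loop that moves a head/tail pointer pair once over the string (rescanning the 26 buckets each step); B instead runs an independent restart-from-scratch scan for each starting index t (copying the full counts, walking right until the outside-distinct counter first hits K, then breaking), i.e. the naive quadratic per-start search instead of the two-pointer window.
import Mathlib
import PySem

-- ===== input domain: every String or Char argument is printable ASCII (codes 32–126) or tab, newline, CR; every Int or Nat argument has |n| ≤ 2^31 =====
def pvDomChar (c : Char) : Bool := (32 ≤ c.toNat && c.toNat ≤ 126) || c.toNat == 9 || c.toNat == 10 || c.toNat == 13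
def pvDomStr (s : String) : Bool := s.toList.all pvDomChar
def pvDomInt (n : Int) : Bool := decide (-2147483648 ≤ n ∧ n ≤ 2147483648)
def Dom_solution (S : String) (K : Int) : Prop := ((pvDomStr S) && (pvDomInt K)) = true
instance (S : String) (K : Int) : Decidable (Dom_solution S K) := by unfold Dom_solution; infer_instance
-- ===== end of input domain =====

-- B replaces A's amortized head/tail sliding-window loop by an independent restart-from-scratch
-- scan per starting index (copy the counts, walk right until the outside-distinct count first
-- hits K, break): a genuinely different (naive quadratic) search, same results (objective:
-- alternative; not faster).

-- ===== PORT A =====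
def checkOutside (A : List Int) : Int :=
  (PySem.List.pyRange 0 26 1).foldl
    (fun res i => if PySem.List.pyGetD A i 0 ≠ 0 then res + 1 else res) 0

-- the while-loop of A; `none` from pyGet? is where Python would raise IndexError (unreachable
-- under Pre_solution; the early return there is only a totality guard)
def loopA (cs : List Char) (K : Int) (A : List Int) (res head tail : Int) : Int :=
  if hh : head < (cs.length : Int) then
    if checkOutside A = K then
      let res' := min res (head - tail + 1)
      match ht : PySem.List.pyGet? cs tail with
      | none => res'
      | some c =>
        loopA cs K
          (PySem.List.pySetD A ((c.toNat : Int) - 97)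
            (PySem.List.pyGetD A ((c.toNat : Int) - 97) 0 + 1)) res' head (tail + 1)
    else
      if head + 1 = (cs.length : Int) then res
      else
        match PySem.List.pyGet? cs (head + 1) with
        | none => res
        | some c =>
          loopA cs K
            (PySem.List.pySetD A ((c.toNat : Int) - 97)
              (PySem.List.pyGetD A ((c.toNat : Int) - 97) 0 - 1)) res (head + 1) tail
  else res
termination_by (((cs.length : Int) - head).toNat + ((cs.length : Int) + 1 - tail).toNat)
decreasing_by
  · have h1 : ¬ PySem.List.pyGet? cs tail = none := by simp [ht]
    rw [PySem.List.pyGet?_eq_none_iff] at h1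
    have h2 : tail < (cs.length : Int) := by
      rcases not_not.mp h1 with ⟨_, h⟩; exact h
    omega
  · omega

def solution (S : String) (K : Int) : Int :=
  let cs := S.toList
  let N : Int := PySem.Str.len S
  if K = 0 then N
  else
    let A := cs.foldl
      (fun A c => PySem.List.pySetD A ((c.toNat : Int) - 97)
        (PySem.List.pyGetD A ((c.toNat : Int) - 97) 0 + 1)) (List.replicate 26 0)
    if checkOutside A < K then -1
    else if checkOutside A = K then 0
    else loopA cs K A N (-1) 0

-- ===== PORT B =====
-- the inner `while h < N: … break` loop of B (restart scan from start index t)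
def scanB (cs : List Char) (K : Int) (t : Nat) (A : List Int) (out best : Int) (h : Nat) : Int :=
  if hh : h < cs.length then
    let i : Int := (cs[h].toNat : Int) - 97
    let A1 := PySem.List.pySetD A i (PySem.List.pyGetD A i 0 - 1)
    let out1 := if PySem.List.pyGetD A1 i 0 = 0 then out - 1 else out
    if out1 = K then min best ((h : Int) - (t : Int) + 1)
    else scanB cs K t A1 out1 best (h + 1)
  else best
termination_by cs.length - h

def solution_alt (S : String) (K : Int) : Int :=
  let cs := S.toList
  let N : Int := PySem.Str.len S
  if K = 0 then N
  else
    let cnt := cs.foldl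
      (fun A c => PySem.List.pySetD A ((c.toNat : Int) - 97)
        (PySem.List.pyGetD A ((c.toNat : Int) - 97) 0 + 1)) (List.replicate 26 0)
    let distinct : Int := 26 - (cnt.count 0 : Nat)
    if distinct < K then -1
    else if distinct = K then 0
    else (List.range cs.length).foldl (fun best t => scanB cs K t cnt distinct best t) N

-- ===== PRECONDITION & SPEC =====
-- Pre_ excludes exactly the inputs where Python raises IndexError: when K ≠ 0 the counting loop
-- `A[ord(c)-97] += 1` (present identically in A and B) raises on any character with code < 71
-- or > 122; when K = 0 both return len(S) before touching the array.
def Pre_solution (S : String) (K : Int) : Prop :=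
  K = 0 ∨ S.toList.all (fun c => 71 ≤ c.toNat && c.toNat ≤ 122) = true
instance (S : String) (K : Int) : Decidable (Pre_solution S K) := by
  unfold Pre_solution; infer_instance
def pvWitness_solution : String × Int := ("abcab", 1)

def Spec_solution (S : String) (K : Int) (out : Int) : Prop := out = solution_alt S K
instance (S : String) (K : Int) (out : Int) : Decidable (Spec_solution S K out) := by
  unfold Spec_solution; infer_instance

-- ===== CLAIM (what is proved, stated in full; the proofs are below) =====
def Claim_equal_solution : Prop :=
  ∀ (S : String) (K : Int), Dom_solution S K → Pre_solution S K → Spec_solution S K (solution S K)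

-- ===== LEMMAS AND PROOFS =====

def pvGood (c : Char) : Prop := 71 ≤ c.toNat ∧ c.toNat ≤ 122
def pvIdx (c : Char) : Nat := if 97 ≤ c.toNat then c.toNat - 97 else c.toNat - 71
def pvBump (X : List Int) (c : Char) : List Int := X.set (pvIdx c) (X.getD (pvIdx c) 0 + 1)
def pvCnt (xs : List Char) : List Int := xs.foldl pvBump (List.replicate 26 0)
def pvCz (A : List Int) : Nat := A.countP (fun x => decide (x ≠ 0))
def pvOut (cs : List Char) (left r : Nat) : List Char := cs.take left ++ cs.drop r
-- number of distinct letters outside the half-open window [t, e)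
def pvO (cs : List Char) (t e : Nat) : Int := (pvCz (pvCnt (pvOut cs t e)) : Int)

-- a qualifying window: [t, e) nonempty, inside the string, at or after position (t0, e0),
-- with exactly K distinct letters outside it
def pvQual (cs : List Char) (K : Int) (t0 e0 t e : Nat) : Prop :=
  t0 ≤ t ∧ e0 ≤ e ∧ t < e ∧ e ≤ cs.length ∧ pvO cs t e = K

-- r is the minimum of res and all qualifying window lengths from (t0, e0)
def pvIsBest (cs : List Char) (K : Int) (t0 e0 : Nat) (res r : Int) : Prop :=
  r ≤ res ∧ (∀ t e, pvQual cs K t0 e0 t e → r ≤ (e : Int) - (t : Int)) ∧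
  (r = res ∨ ∃ t e, pvQual cs K t0 e0 t e ∧ r = (e : Int) - (t : Int))

lemma pvIsBest_unique (cs : List Char) (K : Int) (t0 e0 : Nat) (res r1 r2 : Int)
    (h1 : pvIsBest cs K t0 e0 res r1) (h2 : pvIsBest cs K t0 e0 res r2) : r1 = r2 := by
  obtain ⟨a1, b1, c1⟩ := h1
  obtain ⟨a2, b2, c2⟩ := h2
  have hle : r1 ≤ r2 := by
    rcases c2 with h | ⟨t, e, hq, he⟩
    · omega
    · have := b1 t e hq; omega
  have hge : r2 ≤ r1 := by
    rcases c1 with h | ⟨t, e, hq, he⟩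
    · omega
    · have := b2 t e hq; omega
  omega

lemma pvIdx_lt (c : Char) (hc : pvGood c) : pvIdx c < 26 := by
  rcases hc with ⟨h1, h2⟩; unfold pvIdx; split_ifs <;> omega

lemma pvSet_eq (A : List Int) (c : Char) (hc : pvGood c) (hA : A.length = 26) (v : Int) :
    PySem.List.pySetD A ((c.toNat : Int) - 97) v = A.set (pvIdx c) v := by
  rcases hc with ⟨h1, h2⟩
  simp only [PySem.List.pySetD, PySem.List.pySet?, PySem.List.pyIdx?, hA, pvIdx]
  split_ifs <;> simp_all <;> try omega
  · congr 1; omega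
  · congr 1; omega

lemma pvGet_eq (A : List Int) (c : Char) (hc : pvGood c) (hA : A.length = 26) :
    PySem.List.pyGetD A ((c.toNat : Int) - 97) 0 = A.getD (pvIdx c) 0 := by
  rcases hc with ⟨h1, h2⟩
  simp only [PySem.List.pyGetD, PySem.List.pyGet?, PySem.List.pyIdx?, hA, pvIdx,
    List.getD_eq_getElem?_getD]
  split_ifs <;> simp_all <;> try omega
  · simp [show ((c.toNat : Int) - 97).toNat = c.toNat - 97 from by omega,
      List.getElem?_eq_getElem (show c.toNat - 97 < A.length by omega)]
  · simp [show 26 - (97 - c.toNat) = c.toNat - 71 from by omega,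
      List.getElem?_eq_getElem (show c.toNat - 71 < A.length by omega)]

lemma pvCz_set (A : List Int) (n : Nat) (v : Int) (h : n < A.length) :
    pvCz (A.set n v) + (if A.getD n 0 ≠ 0 then 1 else 0) = pvCz A + (if v ≠ 0 then 1 else 0) := by
  induction A generalizing n with
  | nil => simp at h
  | cons a l ih =>
    cases n with
    | zero =>
      simp [pvCz, List.countP_cons]
      by_cases ha : a = 0 <;> by_cases hv : v = 0 <;> simp [ha, hv] <;> omega
    | succ m =>
      have := ih m (by simpa using h)
      simp [pvCz, List.countP_cons] at this ⊢
      by_cases ha : a = 0 <;> simp [ha] <;> omega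

lemma pvBump_comm (X : List Int) (c d : Char) :
    pvBump (pvBump X c) d = pvBump (pvBump X d) c := by
  by_cases hcd : pvIdx c = pvIdx d
  · by_cases hlen : pvIdx c < X.length
    · simp [pvBump, hcd, List.getD_eq_getElem?_getD, List.getElem?_set_self (by simpa [hcd] using hlen),
        List.set_set]
    · have h1 : X.set (pvIdx c) (X.getD (pvIdx c) 0 + 1) = X :=
        List.set_eq_of_length_le (by omega)
      have h2 : X.set (pvIdx d) (X.getD (pvIdx d) 0 + 1) = X :=
        List.set_eq_of_length_le (by omega)
      simp [pvBump, h1, h2, hcd]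
  · simp [pvBump, List.getD_eq_getElem?_getD, List.getElem?_set_ne (Ne.symm hcd),
      List.getElem?_set_ne hcd, List.set_comm _ _ hcd]

lemma pvFold_bump_swap (l : List Char) (X : List Int) (c : Char) :
    l.foldl pvBump (pvBump X c) = pvBump (l.foldl pvBump X) c := by
  induction l generalizing X with
  | nil => rfl
  | cons a t ih => simp only [List.foldl_cons, pvBump_comm X c a, ih]

lemma pvCnt_middle (l1 l2 : List Char) (c : Char) (Acc : List Int) :
    (l1 ++ c :: l2).foldl pvBump Acc = pvBump ((l1 ++ l2).foldl pvBump Acc) c := by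
  induction l1 generalizing Acc with
  | nil => simp [pvFold_bump_swap]
  | cons a t ih => simp only [List.cons_append, List.foldl_cons, ih]

lemma pvFold_len (l : List Char) (Acc : List Int) :
    (l.foldl pvBump Acc).length = Acc.length := by
  induction l generalizing Acc with
  | nil => rfl
  | cons a t ih => simp [ih, pvBump]

lemma pvCnt_len (xs : List Char) : (pvCnt xs).length = 26 := by
  simp [pvCnt, pvFold_len]

lemma pvFold_getD (xs : List Char) (Acc : List Int) (n : Nat) (h : n < Acc.length) :
    (xs.foldl pvBump Acc).getD n 0 = Acc.getD n 0 + (xs.countP (fun c => decide (pvIdx c = n)) : Int) := by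
  induction xs generalizing Acc with
  | nil => simp
  | cons a t ih =>
    have hlen : (pvBump Acc a).length = Acc.length := by simp [pvBump]
    have := ih (pvBump Acc a) (by omega)
    simp only [List.foldl_cons, this, List.countP_cons]
    by_cases ha : pvIdx a = n
    · subst ha
      simp [pvBump, List.getD_eq_getElem?_getD, List.getElem?_set_self (by omega)]
      push_cast; ring
    · simp [pvBump, List.getD_eq_getElem?_getD, List.getElem?_set_ne ha, ha]

lemma pvCnt_getD (xs : List Char) (n : Nat) (h : n < 26) :
    (pvCnt xs).getD n 0 = (xs.countP (fun c => decide (pvIdx c = n)) : Int) := by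
  have e := pvFold_getD xs (List.replicate 26 0) n (by simpa using h)
  rw [pvCnt, e, List.getD_replicate 0 h]
  simp

lemma pvUnbump (X : List Int) (c : Char) (h : pvIdx c < X.length) :
    (pvBump X c).set (pvIdx c) ((pvBump X c).getD (pvIdx c) 0 - 1) = X := by
  simp [pvBump, List.getD_eq_getElem?_getD, List.getElem?_set_self (by simpa using h),
    List.set_set]
  rw [List.getElem?_eq_getElem h]
  simpa using List.set_getElem_self h

lemma pvSum_gen (A : List Int) (s : Int) :
    A.foldl (fun s x => if x ≠ 0 then s + 1 else s) s = s + (pvCz A : Int) := by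
  induction A generalizing s with
  | nil => simp [pvCz]
  | cons a l ih =>
    simp only [List.foldl_cons, ih, pvCz, List.countP_cons]
    by_cases ha : a = 0 <;> simp [ha] <;> push_cast <;> ring

lemma pvCheck_eq (A : List Int) (h : A.length = 26) : checkOutside A = (pvCz A : Int) := by
  unfold checkOutside
  rw [show (26 : Int) = ((A.length : Nat) : Int) from by simp [h]]
  rw [PySem.List.foldl_pyRange_zero_pyGetD' A 0 (fun res x => if x ≠ 0 then res + 1 else res) 0]
  rw [pvSum_gen]; ring

lemma pvCount_sum (A : List Int) :
    A.countP (fun x => decide (x ≠ 0)) + A.count 0 = A.length := by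
  induction A with
    | nil => simp
    | cons a l ih =>
      rw [List.count_cons, List.countP_cons, List.length_cons]
      rcases eq_or_ne a 0 with ha | ha
      · have c1 : (decide (a ≠ 0)) = false := by simp [ha]
        have c2 : (a == (0 : Int)) = true := by simpa using ha
        rw [c1, c2]
        simp only [Bool.false_eq_true, if_false, if_true]
        omega
      · have c1 : (decide (a ≠ 0)) = true := by simp [ha]
        have c2 : (a == (0 : Int)) = false := by simpa using ha
        rw [c1, c2]
        simp only [Bool.false_eq_true, if_false, if_true]
        omega

lemma pvCount_eq (A : List Int) (h : A.length = 26) :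
    (26 : Int) - (A.count 0 : Nat) = (pvCz A : Int) := by
  have hsum := pvCount_sum A
  unfold pvCz
  omega

lemma pvCz_bump_zero (A : List Int) (c : Char) (hi : pvIdx c < A.length)
    (h0 : A.getD (pvIdx c) 0 = 0) : pvCz (pvBump A c) = pvCz A + 1 := by
  have h1 := pvCz_set A (pvIdx c) (A.getD (pvIdx c) 0 + 1) hi
  rw [if_neg (by omega : ¬ A.getD (pvIdx c) 0 ≠ 0),
    if_pos (by omega : A.getD (pvIdx c) 0 + 1 ≠ 0)] at h1
  unfold pvBump
  omega

lemma pvCz_bump_pos (A : List Int) (c : Char) (hi : pvIdx c < A.length)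
    (hpos : 0 ≤ A.getD (pvIdx c) 0)
    (h0 : ¬ A.getD (pvIdx c) 0 = 0) : pvCz (pvBump A c) = pvCz A := by
  have h1 := pvCz_set A (pvIdx c) (A.getD (pvIdx c) 0 + 1) hi
  rw [if_pos h0, if_pos (by omega : A.getD (pvIdx c) 0 + 1 ≠ 0)] at h1
  unfold pvBump
  omega

lemma pvOut_full (cs : List Char) (r : Nat) : pvOut cs r r = cs := by
  simp [pvOut]

lemma pvOut_take_succ (cs : List Char) (left r : Nat) (h : left < cs.length) :
    pvOut cs (left + 1) r = cs.take left ++ cs[left] :: cs.drop r := by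
  unfold pvOut
  rw [List.take_add_one, List.getElem?_eq_getElem h]
  simp only [Option.toList_some, List.append_assoc, List.singleton_append]

-- counts of the outside of [t+1, e) = counts of the outside of [t, e) bumped at cs[t]
lemma pvCnt_t_succ (cs : List Char) (t e : Nat) (h : t < cs.length) :
    pvCnt (pvOut cs (t + 1) e) = pvBump (pvCnt (pvOut cs t e)) cs[t] := by
  rw [pvOut_take_succ cs t e h]
  exact pvCnt_middle (cs.take t) (cs.drop e) cs[t] _

-- counts of the outside of [t, e) = counts of the outside of [t, e+1) bumped at cs[e]
lemma pvCnt_e_succ (cs : List Char) (t e : Nat) (h : e < cs.length) :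
    pvCnt (pvOut cs t e) = pvBump (pvCnt (pvOut cs t (e + 1))) cs[e] := by
  show pvCnt (cs.take t ++ cs.drop e) = _
  rw [List.drop_eq_getElem_cons h]
  exact pvCnt_middle (cs.take t) (cs.drop (e + 1)) cs[e] _

lemma pvCnt_getD_nonneg (xs : List Char) (n : Nat) (h : n < 26) :
    0 ≤ (pvCnt xs).getD n 0 := by
  rw [pvCnt_getD xs n h]; positivity

lemma pvO_t_mono_step (cs : List Char) (hg : ∀ c ∈ cs, pvGood c) (t e : Nat)
    (h : t < cs.length) : pvO cs t e ≤ pvO cs (t + 1) e := by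
  have hgc : pvGood cs[t] := hg cs[t] (List.getElem_mem h)
  have hi : pvIdx cs[t] < 26 := pvIdx_lt _ hgc
  have hlen : (pvCnt (pvOut cs t e)).length = 26 := pvCnt_len _
  unfold pvO
  rw [pvCnt_t_succ cs t e h]
  by_cases h0 : (pvCnt (pvOut cs t e)).getD (pvIdx cs[t]) 0 = 0
  · rw [pvCz_bump_zero _ _ (by omega) h0]; push_cast; omega
  · rw [pvCz_bump_pos _ _ (by omega) (by
      have : pvOut cs t e = cs.take t ++ cs.drop e := rfl
      exact pvCnt_getD_nonneg _ _ hi) h0]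

lemma pvO_t_mono (cs : List Char) (hg : ∀ c ∈ cs, pvGood c) (t t' e : Nat)
    (htt : t ≤ t') (hte : t' ≤ cs.length) : pvO cs t e ≤ pvO cs t' e := by
  induction t' with
  | zero => have : t = 0 := by omega
            simp [this]
  | succ m ih =>
    by_cases hm : t ≤ m
    · have := ih hm (by omega)
      have := pvO_t_mono_step cs hg m e (by omega)
      omega
    · have : t = m + 1 := by omega
      simp [this]

-- moving the right end one step right lowers the outside-distinct count by 0 or 1
lemma pvO_e_step (cs : List Char) (hg : ∀ c ∈ cs, pvGood c) (t e : Nat)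
    (h : e < cs.length) : pvO cs t (e + 1) ≤ pvO cs t e ∧ pvO cs t e ≤ pvO cs t (e + 1) + 1 := by
  have hgc : pvGood cs[e] := hg cs[e] (List.getElem_mem h)
  have hi : pvIdx cs[e] < 26 := pvIdx_lt _ hgc
  unfold pvO
  rw [pvCnt_e_succ cs t e h]
  by_cases h0 : (pvCnt (pvOut cs t (e + 1))).getD (pvIdx cs[e]) 0 = 0
  · rw [pvCz_bump_zero _ _ (by rw [pvCnt_len]; omega) h0]; push_cast; omega
  · rw [pvCz_bump_pos _ _ (by rw [pvCnt_len]; omega) (pvCnt_getD_nonneg _ _ hi) h0]; omega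

lemma pvO_diag (cs : List Char) (t : Nat) : pvO cs t t = (pvCz (pvCnt cs) : Int) := by
  unfold pvO; rw [pvOut_full]

lemma loopA_shrink (cs : List Char) (K : Int) (A : List Int) (res head tail : Int) (c : Char)
    (hh : head < (cs.length : Int)) (hK : checkOutside A = K)
    (hget : PySem.List.pyGet? cs tail = some c) :
    loopA cs K A res head tail =
      loopA cs K
        (PySem.List.pySetD A ((c.toNat : Int) - 97) (PySem.List.pyGetD A ((c.toNat : Int) - 97) 0 + 1))
        (min res (head - tail + 1)) head (tail + 1) := by
  rw [loopA]; rw [dif_pos hh, if_pos hK, hget]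

lemma loopA_done (cs : List Char) (K : Int) (A : List Int) (res head tail : Int)
    (hh : head < (cs.length : Int)) (hK : checkOutside A ≠ K)
    (he : head + 1 = (cs.length : Int)) :
    loopA cs K A res head tail = res := by
  rw [loopA]; rw [dif_pos hh, if_neg hK, if_pos he]

lemma loopA_expand (cs : List Char) (K : Int) (A : List Int) (res head tail : Int) (c : Char)
    (hh : head < (cs.length : Int)) (hK : checkOutside A ≠ K)
    (hne : ¬ head + 1 = (cs.length : Int))
    (hget : PySem.List.pyGet? cs (head + 1) = some c) :
    loopA cs K A res head tail =
      loopA cs K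
        (PySem.List.pySetD A ((c.toNat : Int) - 97) (PySem.List.pyGetD A ((c.toNat : Int) - 97) 0 - 1))
        res (head + 1) tail := by
  rw [loopA]; rw [dif_pos hh, if_neg hK, if_neg hne, hget]

lemma pvCountPort (xs : List Char) (Acc : List Int) (hg : ∀ c ∈ xs, pvGood c)
    (hA : Acc.length = 26) :
    xs.foldl (fun A c => PySem.List.pySetD A ((c.toNat : Int) - 97)
        (PySem.List.pyGetD A ((c.toNat : Int) - 97) 0 + 1)) Acc = xs.foldl pvBump Acc := by
  induction xs generalizing Acc with
  | nil => rfl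
  | cons a t ih =>
    have hga : pvGood a := hg a (by simp)
    simp only [List.foldl_cons, pvSet_eq Acc a hga hA, pvGet_eq Acc a hga hA]
    exact ih (pvBump Acc a) (fun c hc => hg c (by simp [hc])) (by simp [pvBump, hA])

-- ===== A-side characterisation: loopA from state (tail = t, head = e - 1) computes the best =====
lemma loopA_isBest (cs : List Char) (K : Int) (hg : ∀ c ∈ cs, pvGood c)
    (hD : K < (pvCz (pvCnt cs) : Int)) :
    ∀ (m t e : Nat) (res : Int), m = 2 * cs.length - t - e → t ≤ e → e ≤ cs.length →
      K ≤ pvO cs t e →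
      pvIsBest cs K t e res (loopA cs K (pvCnt (pvOut cs t e)) res ((e : Int) - 1) (t : Int)) := by
  intro m
  induction m with
  | zero =>
    intro t e res hm hte heN hK
    -- t = e = cs.length
    have ht : t = cs.length := by omega
    have he : e = cs.length := by omega
    have hKe : pvO cs t e ≠ K := by rw [ht, he, pvO_diag]; omega
    rw [loopA_done _ _ _ _ _ _ (by omega)
      (by rw [pvCheck_eq _ (pvCnt_len _)]; exact hKe) (by omega)]
    refine ⟨le_refl _, ?_, Or.inl rfl⟩
    intro t' e' ⟨h1, h2, h3, h4, h5⟩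
    omega
  | succ m ih =>
    intro t e res hm hte heN hK
    have hAlen : (pvCnt (pvOut cs t e)).length = 26 := pvCnt_len _
    by_cases hKe : pvO cs t e = K
    · -- record the window [t, e) and shrink: tail + 1
      have htlt : t < e := by
        by_contra hc
        have : t = e := by omega
        rw [this, pvO_diag] at hKe
        omega
      have htN : t < cs.length := by omega
      have hgc : pvGood cs[t] := hg cs[t] (List.getElem_mem htN)
      have hget : PySem.List.pyGet? cs (t : Int) = some cs[t] := by
        rw [PySem.List.pyGet?_natCast, List.getElem?_eq_getElem htN]
      have hstep := loopA_shrink cs K (pvCnt (pvOut cs t e)) res ((e : Int) - 1) (t : Int)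
        cs[t] (by push_cast; omega) (by rw [pvCheck_eq _ hAlen]; exact hKe) hget
      rw [pvSet_eq _ _ hgc hAlen, pvGet_eq _ _ hgc hAlen] at hstep
      rw [← pvBump, ← pvCnt_t_succ cs t e htN] at hstep
      have hmin : (e : Int) - 1 - (t : Int) + 1 = (e : Int) - (t : Int) := by ring
      rw [hmin] at hstep
      have hK1 : K ≤ pvO cs (t + 1) e := le_trans (le_of_eq hKe.symm)
        (pvO_t_mono_step cs hg t e htN)
      have hih := ih (t + 1) e (min res ((e : Int) - (t : Int))) (by omega) (by omega) heN hK1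
      rw [show (((t + 1 : Nat)) : Int) = (t : Int) + 1 by push_cast; ring] at hih
      rw [hstep]
      obtain ⟨ha, hb, hc⟩ := hih
      refine ⟨by omega, ?_, ?_⟩
      · intro t' e' ⟨h1, h2, h3, h4, h5⟩
        by_cases ht' : t' = t
        · subst ht'
          have : (e : Int) - (t' : Int) ≤ (e' : Int) - (t' : Int) := by
            have : (t' : Int) ≤ (t' : Int) := le_refl _
            omega
          omega
        · exact hb t' e' ⟨by omega, h2, h3, h4, h5⟩
      · rcases hc with h | ⟨t', e', hq, he'⟩
        · rcases min_cases res ((e : Int) - (t : Int)) with ⟨hm1, _⟩ | ⟨hm1, _⟩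
          · left; omega
          · right; exact ⟨t, e, ⟨le_refl _, le_refl _, htlt, heN, hKe⟩, by omega⟩
        · right
          obtain ⟨h1, h2, h3, h4, h5⟩ := hq
          exact ⟨t', e', ⟨by omega, h2, h3, h4, h5⟩, he'⟩
    · -- pvO cs t e > K: no window ending at e qualifies; expand head
      by_cases heq : e = cs.length
      · rw [loopA_done _ _ _ _ _ _ (by omega)
          (by rw [pvCheck_eq _ hAlen]; exact hKe) (by push_cast [heq]; ring)]
        refine ⟨le_refl _, ?_, Or.inl rfl⟩
        intro t' e' ⟨h1, h2, h3, h4, h5⟩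
        have he' : e' = e := by omega
        subst he'
        have := pvO_t_mono cs hg t t' e' h1 (by omega)
        omega
      · have heN' : e < cs.length := by omega
        have hgc : pvGood cs[e] := hg cs[e] (List.getElem_mem heN')
        have hget : PySem.List.pyGet? cs ((e : Int) - 1 + 1) = some cs[e] := by
          rw [show (e : Int) - 1 + 1 = ((e : Nat) : Int) by ring]
          rw [PySem.List.pyGet?_natCast, List.getElem?_eq_getElem heN']
        have hstep := loopA_expand cs K (pvCnt (pvOut cs t e)) res ((e : Int) - 1) (t : Int)
          cs[e] (by push_cast; omega) (by rw [pvCheck_eq _ hAlen]; exact hKe)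
          (by push_cast; omega) hget
        have hXlen : (pvCnt (pvOut cs t (e + 1))).length = 26 := pvCnt_len _
        have hAX : pvCnt (pvOut cs t e) = pvBump (pvCnt (pvOut cs t (e + 1))) cs[e] :=
          pvCnt_e_succ cs t e heN'
        have hset : (pvCnt (pvOut cs t e)).set (pvIdx cs[e])
            ((pvCnt (pvOut cs t e)).getD (pvIdx cs[e]) 0 - 1) = pvCnt (pvOut cs t (e + 1)) := by
          rw [hAX]; exact pvUnbump _ _ (by rw [hXlen]; exact pvIdx_lt _ hgc)
        rw [pvSet_eq _ _ hgc hAlen, pvGet_eq _ _ hgc hAlen, hset] at hstep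
        rw [show (e : Int) - 1 + 1 = ((e : Nat) : Int) by ring] at hstep
        have hK1 : K ≤ pvO cs t (e + 1) := by
          have := pvO_e_step cs hg t e heN'
          omega
        have hih := ih t (e + 1) res (by omega) (by omega) (by omega) hK1
        rw [show (((e + 1 : Nat)) : Int) - 1 = ((e : Nat) : Int) by push_cast; ring] at hih
        rw [hstep]
        obtain ⟨ha, hb, hc⟩ := hih
        refine ⟨ha, ?_, ?_⟩
        · intro t' e' ⟨h1, h2, h3, h4, h5⟩
          by_cases he' : e' = e
          · subst he'
            have := pvO_t_mono cs hg t t' e' h1 (by omega)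
            omega
          · exact hb t' e' ⟨h1, by omega, h3, h4, h5⟩
        · rcases hc with h | ⟨t', e', hq, he'⟩
          · left; exact h
          · right
            obtain ⟨h1, h2, h3, h4, h5⟩ := hq
            exact ⟨t', e', ⟨h1, by omega, h3, h4, h5⟩, he'⟩

-- ===== B-side characterisation =====
-- what scanB returns from state (t, h): either no hit to the right of h, or the first hit e
def pvScanRes (cs : List Char) (K : Int) (t h : Nat) (best r : Int) : Prop :=
  (r = best ∧ ∀ e, h < e → e ≤ cs.length → pvO cs t e ≠ K) ∨
  (∃ e, h < e ∧ e ≤ cs.length ∧ pvO cs t e = K ∧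
    (∀ e', h < e' → e' < e → pvO cs t e' ≠ K) ∧ r = min best ((e : Int) - (t : Int)))

lemma scanB_char (cs : List Char) (K : Int) (hg : ∀ c ∈ cs, pvGood c) :
    ∀ (m t h : Nat) (best : Int), m = cs.length - h → t ≤ h → h ≤ cs.length →
      pvScanRes cs K t h best
        (scanB cs K t (pvCnt (pvOut cs t h)) (pvO cs t h) best h) := by
  intro m
  induction m with
  | zero =>
    intro t h best hm hth hhN
    have hh : h = cs.length := by omega
    rw [scanB, dif_neg (by omega)]
    left
    exact ⟨rfl, fun e he1 he2 => by omega⟩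
  | succ m ih =>
    intro t h best hm hth hhN
    have hhN' : h < cs.length := by omega
    have hgc : pvGood cs[h] := hg cs[h] (List.getElem_mem hhN')
    have hAlen : (pvCnt (pvOut cs t h)).length = 26 := pvCnt_len _
    have hXlen : (pvCnt (pvOut cs t (h + 1))).length = 26 := pvCnt_len _
    have hAX : pvCnt (pvOut cs t h) = pvBump (pvCnt (pvOut cs t (h + 1))) cs[h] :=
      pvCnt_e_succ cs t h hhN'
    have hi : pvIdx cs[h] < 26 := pvIdx_lt _ hgc
    rw [scanB, dif_pos hhN']
    simp only
    rw [pvSet_eq _ _ hgc hAlen, pvGet_eq _ _ hgc hAlen, hAX,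
      pvUnbump _ _ (by rw [hXlen]; omega)]
    rw [pvGet_eq _ _ hgc hXlen]
    -- the updated counter equals pvO cs t (h+1)
    have hout : (if (pvCnt (pvOut cs t (h + 1))).getD (pvIdx cs[h]) 0 = 0
        then pvO cs t h - 1 else pvO cs t h) = pvO cs t (h + 1) := by
      by_cases h0 : (pvCnt (pvOut cs t (h + 1))).getD (pvIdx cs[h]) 0 = 0
      · rw [if_pos h0]
        unfold pvO
        rw [hAX, pvCz_bump_zero _ _ (by omega) h0]
        push_cast; ring
      · rw [if_neg h0]
        unfold pvO
        rw [hAX, pvCz_bump_pos _ _ (by omega) (pvCnt_getD_nonneg _ _ hi) h0]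
    rw [hout]
    by_cases hKhit : pvO cs t (h + 1) = K
    · rw [if_pos hKhit]
      right
      exact ⟨h + 1, by omega, by omega, hKhit, fun e' he1 he2 => by omega,
        by push_cast; ring_nf⟩
    · rw [if_neg hKhit]
      have := ih t (h + 1) best (by omega) (by omega) (by omega)
      rcases this with ⟨hr, hnone⟩ | ⟨e, he1, he2, he3, he4, he5⟩
      · left
        refine ⟨hr, fun e he1 he2 => ?_⟩
        by_cases he : e = h + 1
        · subst he; exact hKhit
        · exact hnone e (by omega) he2
      · right
        refine ⟨e, by omega, he2, he3, fun e' h1 h2 => ?_, he5⟩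
        by_cases he' : e' = h + 1
        · subst he'; exact hKhit
        · exact he4 e' (by omega) h2

-- the outer fold of B computes the best over all starts ≥ j
lemma foldB_isBest (cs : List Char) (K : Int) (hg : ∀ c ∈ cs, pvGood c) :
    ∀ (m j : Nat) (best : Int), m = cs.length - j → j ≤ cs.length →
      pvIsBest cs K j 0 best
        ((List.range' j (cs.length - j)).foldl
          (fun best t => scanB cs K t (pvCnt cs) ((pvCz (pvCnt cs) : Int)) best t) best) := by
  intro m
  induction m with
  | zero =>
    intro j best hm hj
    have : cs.length - j = 0 := by omega
    rw [this]
    simp only [List.range'_zero, List.foldl_nil]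
    refine ⟨le_refl _, ?_, Or.inl rfl⟩
    intro t e ⟨h1, h2, h3, h4, h5⟩
    have ht : t = cs.length := by omega
    omega
  | succ m ih =>
    intro j best hm hj
    have hjN : j < cs.length := by omega
    rw [show cs.length - j = (cs.length - (j + 1)) + 1 by omega, List.range'_succ,
      List.foldl_cons]
    have hcnt : pvCnt cs = pvCnt (pvOut cs j j) := by rw [pvOut_full]
    have hO : (pvCz (pvCnt cs) : Int) = pvO cs j j := by rw [pvO_diag]
    have hchar := scanB_char cs K hg (cs.length - j) j j best (by omega) (le_refl j) (by omega)
    rw [← hcnt, ← hO] at hchar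
    set best' := scanB cs K j (pvCnt cs) ((pvCz (pvCnt cs) : Int)) best j with hbest'
    have hih := ih (j + 1) best' (by omega) (by omega)
    obtain ⟨ha, hb, hc⟩ := hih
    rcases hchar with ⟨hr, hnone⟩ | ⟨e0, he1, he2, he3, he4, he5⟩
    · -- column j has no qualifying window
      refine ⟨by omega, ?_, ?_⟩
      · intro t e ⟨h1, h2, h3, h4, h5⟩
        by_cases ht : t = j
        · subst ht; exact absurd h5 (hnone e (by omega) h4)
        · exact hb t e ⟨by omega, by omega, h3, h4, h5⟩
      · rcases hc with h | ⟨t, e, hq, he'⟩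
        · left; omega
        · right
          obtain ⟨h1, h2, h3, h4, h5⟩ := hq
          exact ⟨t, e, ⟨by omega, by omega, h3, h4, h5⟩, he'⟩
    · -- column j first hits K at e0, best' = min best (e0 - j)
      refine ⟨by omega, ?_, ?_⟩
      · intro t e ⟨h1, h2, h3, h4, h5⟩
        by_cases ht : t = j
        · subst ht
          have he0e : e0 ≤ e := by
            by_contra hcon
            exact he4 e (by omega) (by omega) h5
          have : (e0 : Int) - (t : Int) ≤ (e : Int) - (t : Int) := by omega
          omega
        · exact hb t e ⟨by omega, by omega, h3, h4, h5⟩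
      · rcases hc with h | ⟨t, e, hq, he'⟩
        · rw [h, he5]
          rcases min_cases best ((e0 : Int) - (j : Int)) with ⟨hm1, _⟩ | ⟨hm1, _⟩
          · left; omega
          · right
            exact ⟨j, e0, ⟨le_refl _, by omega, by omega, he2, he3⟩, by omega⟩
        · right
          obtain ⟨h1, h2, h3, h4, h5⟩ := hq
          exact ⟨t, e, ⟨by omega, by omega, h3, h4, h5⟩, he'⟩

-- ===== VERDICT (by name: the statement is the Claim_ definition above) =====
theorem solution_spec : Claim_equal_solution := by
  unfold Claim_equal_solution Spec_solution
  intro S K hdom hpre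
  by_cases hK0 : K = 0
  · unfold solution solution_alt
    simp [hK0]
  · have hg : ∀ c ∈ S.toList, pvGood c := by
      rcases hpre with h | h
      · exact absurd h hK0
      · intro c hc
        have := List.all_eq_true.mp h c hc
        simpa [pvGood] using this
    have hcnt : S.toList.foldl
        (fun A c => PySem.List.pySetD A ((c.toNat : Int) - 97)
          (PySem.List.pyGetD A ((c.toNat : Int) - 97) 0 + 1)) (List.replicate 26 0)
        = pvCnt S.toList := by
      rw [pvCountPort _ _ hg (by simp)]; rfl
    have hchk : checkOutside (pvCnt S.toList) = (pvCz (pvCnt S.toList) : Int) :=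
      pvCheck_eq _ (pvCnt_len _)
    have hdis : (26 : Int) - ((pvCnt S.toList).count 0 : Nat) = (pvCz (pvCnt S.toList) : Int) :=
      pvCount_eq _ (pvCnt_len _)
    unfold solution solution_alt
    simp only [if_neg hK0, hcnt, hchk, hdis]
    by_cases hlt : (pvCz (pvCnt S.toList) : Int) < K
    · simp [hlt]
    · by_cases heq : (pvCz (pvCnt S.toList) : Int) = K
      · simp [hlt, heq]
      · have hD : K < (pvCz (pvCnt S.toList) : Int) := by omega
        simp only [if_neg hlt, if_neg heq]
        have hA := loopA_isBest S.toList K hg hD (2 * S.toList.length) 0 0 (PySem.Str.len S)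
          (by omega) (le_refl 0) (by omega) (by rw [pvO_diag]; omega)
        have hB := foldB_isBest S.toList K hg S.toList.length 0 (PySem.Str.len S)
          (by omega) (by omega)
        rw [pvOut_full] at hA
        simp only [Nat.cast_zero, zero_sub] at hA
        rw [show S.toList.length - 0 = S.toList.length by omega] at hB
        rw [show List.range' 0 S.toList.length = List.range S.toList.length by
          rw [List.range_eq_range']] at hB
        exact pvIsBest_unique S.toList K 0 0 (PySem.Str.len S) _ _ hA hB
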